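-- pv_equiv track=rewrite | github.com/pantonshire/smolbotbot | search.py | without_consecutive_tokens
-- ===== SOURCE A (Python) =====
-- def without_consecutive_tokens(token_data, to_remove):
--     no_to_remove = len(to_remove)
--     no_remove_from = len(token_data)
--     if no_to_remove > no_remove_from:
--         return token_data
--     for x in range(0, no_remove_from - no_to_remove + 1):
--         if [data[0] for data in token_data[x:x+no_to_remove]] == to_remove:
--             return token_data[:x] + token_data[x+no_to_remove:]
--     return token_data
-- ===== SOURCE B (Python) =====
-- def without_consecutive_tokens(token_data, to_remove):
--     m = len(to_remove)
--     n = len(token_data)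
--     if m == 0 or m > n:
--         return token_data
--     # KMP failure table over the pattern of first tokens
--     fail = [0] * m
--     k = 0
--     for i in range(1, m):
--         while k > 0 and to_remove[i] != to_remove[k]:
--             k = fail[k - 1]
--         if to_remove[i] == to_remove[k]:
--             k += 1
--         fail[i] = k
--     # single left-to-right KMP scan over the first tokens
--     k = 0
--     for i, data in enumerate(token_data):
--         t = data[0]
--         while k > 0 and t != to_remove[k]:
--             k = fail[k - 1]
--         if t == to_remove[k]:
--             k += 1
--         if k == m:
--             start = i + 1 - m
--             return token_data[:start] + token_data[i + 1:]
--     return token_data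
-- ===== Notes on version B (the rewrite author's own statement) =====
-- stated objective: alternative
-- what changed: B runs the Knuth-Morris-Pratt algorithm on the sequence of first tokens (a failure table over to_remove, then one left-to-right scan that never re-compares a window) instead of A's rebuilding and comparing an m-element first-token window at every position; Pre_ excludes exactly the inputs where A raises IndexError on data[0] of an empty inner list.
import Mathlib
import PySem

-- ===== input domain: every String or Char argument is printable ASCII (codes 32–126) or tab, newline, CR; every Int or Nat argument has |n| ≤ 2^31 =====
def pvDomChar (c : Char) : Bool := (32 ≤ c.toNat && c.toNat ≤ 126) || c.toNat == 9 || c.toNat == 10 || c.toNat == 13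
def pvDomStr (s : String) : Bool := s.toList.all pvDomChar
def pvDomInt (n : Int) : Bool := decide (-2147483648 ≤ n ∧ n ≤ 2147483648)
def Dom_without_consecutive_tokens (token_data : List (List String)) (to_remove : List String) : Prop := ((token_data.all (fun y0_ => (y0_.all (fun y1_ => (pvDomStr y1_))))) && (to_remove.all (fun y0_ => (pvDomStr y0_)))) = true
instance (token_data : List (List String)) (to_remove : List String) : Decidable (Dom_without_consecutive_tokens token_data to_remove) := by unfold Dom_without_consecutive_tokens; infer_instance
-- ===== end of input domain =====

-- B replaces A's per-position window rebuild with a single Knuth-Morris-Pratt pass over the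
-- first tokens (failure table + left-to-right scan); equivalence of return values proved on Pre_.


-- ===== PORT A =====
-- the 'for x in range(...)' loop with its early returns; 'data[0]' is ported as
-- 'data.headD ""', exact because on Pre_ every inner list the Python scan reads is nonempty
def pvAScan (token_data : List (List String)) (to_remove : List String) : List Int → List (List String)
  | [] => token_data
  | x :: xs =>
    if (PySem.List.slice token_data (some x) (some (x + (to_remove.length : Int)))).map (fun data => data.headD "") = to_remove then
      PySem.List.slice token_data none (some x) ++ PySem.List.slice token_data (some (x + (to_remove.length : Int))) none
    else pvAScan token_data to_remove xs

def without_consecutive_tokens (token_data : List (List String)) (to_remove : List String) : List (List String) :=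
  let no_to_remove : Int := to_remove.length
  let no_remove_from : Int := token_data.length
  if no_to_remove > no_remove_from then token_data
  else pvAScan token_data to_remove (PySem.List.pyRange 0 (no_remove_from - no_to_remove + 1) 1)

-- ===== PORT B =====
-- the inner 'while k > 0 and t != to_remove[k]: k = fail[k-1]' loop of Source B; the fuel
-- argument (called with fuel = k) is exact because the table satisfies fail[j] <= j,
-- so k strictly decreases and the Python loop runs at most k times
def pvDescend (pat : List String) (fail : List Nat) (t : String) : Nat → Nat → Nat
  | 0, k => k
  | fuel + 1, k =>
    if 0 < k ∧ t ≠ pat.getD k "" then pvDescend pat fail t fuel (fail.getD (k - 1) 0)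
    else k

-- the 'for i in range(1, m)' failure-table loop; Source B writes fail[i] = k into a
-- preallocated [0]*m in increasing i, never reading an unwritten slot (fail[j] is read
-- only for j < k <= i), so appending the entries in order is exact
def pvFailAux (pat : List String) : List Nat → Nat → List Nat → List Nat
  | fail, _, [] => fail
  | fail, k, i :: rest =>
    let k1 := pvDescend pat fail (pat.getD i "") k k
    let k2 := if pat.getD i "" = pat.getD k1 "" then k1 + 1 else k1
    pvFailAux pat (fail ++ [k2]) k2 rest

def pvFail (pat : List String) : List Nat := pvFailAux pat [0] 0 (List.range' 1 (pat.length - 1))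

-- the 'for i, data in enumerate(token_data)' KMP scan; the slices token_data[:start] and
-- token_data[i+1:] are take/drop, exact because 0 <= start and 0 <= i+1
def pvKmpScan (td : List (List String)) (pat : List String) (fail : List Nat) : List (List String) → Nat → Nat → List (List String)
  | [], _, _ => td
  | data :: rest, i, k =>
    let t := data.headD ""
    let k1 := pvDescend pat fail t k k
    let k2 := if t = pat.getD k1 "" then k1 + 1 else k1
    if k2 = pat.length then td.take (i + 1 - pat.length) ++ td.drop (i + 1)
    else pvKmpScan td pat fail rest (i + 1) k2

def without_consecutive_tokens_alt (token_data : List (List String)) (to_remove : List String) : List (List String) :=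
  let m := to_remove.length
  if m = 0 ∨ m > token_data.length then token_data
  else pvKmpScan token_data to_remove (pvFail to_remove) token_data 0 0

-- ===== PRECONDITION & SPEC =====
-- Pre_ is exactly the set of inputs on which the Python A returns (elsewhere A raises
-- IndexError on data[0] of an empty inner list): the pattern is empty, or longer than the
-- data, or every inner list is nonempty, or the pattern of first tokens occurs somewhere
-- with all inner lists up to the end of that occurrence nonempty (so A returns before its
-- scan reaches an empty inner list).
def Pre_without_consecutive_tokens (token_data : List (List String)) (to_remove : List String) : Prop :=
  to_remove.length = 0 ∨ to_remove.length > token_data.length ∨ (∀ d ∈ token_data, d ≠ []) ∨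
  (∃ x < token_data.length + 1, x + to_remove.length ≤ token_data.length ∧
    (∀ i < x + to_remove.length, token_data.getD i [] ≠ []) ∧
    ((token_data.drop x).take to_remove.length).map (fun d => d.headD "") = to_remove)
instance (token_data : List (List String)) (to_remove : List String) : Decidable (Pre_without_consecutive_tokens token_data to_remove) := by unfold Pre_without_consecutive_tokens; infer_instance

def pvWitness_without_consecutive_tokens : List (List String) × List String := ([["a"], ["b"], ["c"]], ["b"])

def Spec_without_consecutive_tokens (token_data : List (List String)) (to_remove : List String) (out : List (List String)) : Prop := out = without_consecutive_tokens_alt token_data to_remove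
instance (token_data : List (List String)) (to_remove : List String) (out : List (List String)) : Decidable (Spec_without_consecutive_tokens token_data to_remove out) := by unfold Spec_without_consecutive_tokens; infer_instance

-- ===== CLAIM (what is proved, stated in full; the proofs are below) =====
def Claim_equal_without_consecutive_tokens : Prop := ∀ (token_data : List (List String)) (to_remove : List String), Dom_without_consecutive_tokens token_data to_remove → Pre_without_consecutive_tokens token_data to_remove → Spec_without_consecutive_tokens token_data to_remove (without_consecutive_tokens token_data to_remove)

-- ===== LEMMAS AND PROOFS =====

-- the common value both programs compute: remove the window at the first match position (if any)
def pvRes (token_data : List (List String)) (m : Nat) : Option Nat → List (List String)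
  | some j => token_data.take j ++ token_data.drop (j + m)
  | none => token_data

-- the KMP automaton state: the longest j ≤ b such that pat.take j is a suffix of s
def pvM (pat s : List String) (b : Nat) : Nat := Nat.findGreatest (fun j => pat.take j <:+ s) b

lemma pvM_le (pat s : List String) (b : Nat) : pvM pat s b ≤ b := Nat.findGreatest_le b

lemma pvM_spec (pat s : List String) (b : Nat) : pat.take (pvM pat s b) <:+ s :=
  Nat.findGreatest_spec (P := fun j => pat.take j <:+ s) (Nat.zero_le b) (by simp)

lemma pvM_ge (pat s : List String) (b j : Nat) (hj : j ≤ b) (h : pat.take j <:+ s) :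
    j ≤ pvM pat s b := Nat.le_findGreatest hj h

lemma pvSnocSuffix {xs ys : List String} {a b : String} :
    xs ++ [a] <:+ ys ++ [b] ↔ a = b ∧ xs <:+ ys := by
  rw [← List.reverse_prefix]; simp

lemma pvTakeSnoc (pat : List String) (j : Nat) (hj : j < pat.length) :
    pat.take (j + 1) = pat.take j ++ [pat.getD j ""] := by
  rw [List.take_add_one, List.getD_eq_getElem?_getD, List.getElem?_eq_getElem hj]
  rfl

-- extending a suffix-prefix by one character
lemma pvExtend (pat s : List String) (t : String) (j : Nat) (h1 : 1 ≤ j) (hj : j ≤ pat.length) :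
    (pat.take j <:+ s ++ [t]) ↔ (pat.take (j - 1) <:+ s ∧ pat.getD (j - 1) "" = t) := by
  obtain ⟨j', rfl⟩ : ∃ j', j = j' + 1 := ⟨j - 1, by omega⟩
  rw [pvTakeSnoc pat j' (by omega), pvSnocSuffix]
  simp [And.comm]

-- two suffix-prefixes of the same string are nested
lemma pvBorder (pat s : List String) (j k : Nat) (hjk : j ≤ k)
    (h1 : pat.take j <:+ s) (h2 : pat.take k <:+ s) : pat.take j <:+ pat.take k :=
  List.suffix_of_suffix_length_le h1 h2 (by simp; omega)

-- the descend loop: it only shrinks k, lands on a suffix-prefix, exits on the loop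
-- condition, and skips no extensible suffix-prefix
lemma pvDescend_spec (pat : List String) (fail : List Nat) (s : List String) (t : String) :
    ∀ fuel k, k ≤ fuel → k < pat.length → pat.take k <:+ s →
    (∀ j, j < k → fail.getD j 0 = pvM pat (pat.take (j + 1)) j) →
    (pvDescend pat fail t fuel k ≤ k ∧
     pat.take (pvDescend pat fail t fuel k) <:+ s ∧
     (pvDescend pat fail t fuel k = 0 ∨ t = pat.getD (pvDescend pat fail t fuel k) "") ∧
     (∀ j, 1 ≤ j → j ≤ k + 1 → j ≤ pat.length → pat.take (j - 1) <:+ s →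
        pat.getD (j - 1) "" = t → j ≤ pvDescend pat fail t fuel k + 1)) := by
  intro fuel
  induction fuel with
  | zero =>
    intro k hfuel hkm hP hfail
    have hk0 : k = 0 := by omega
    subst hk0
    refine ⟨le_rfl, hP, Or.inl rfl, ?_⟩
    intro j h1 h2 _ _ _
    omega
  | succ fuel ih =>
    intro k hfuel hkm hP hfail
    by_cases h : 0 < k ∧ t ≠ pat.getD k ""
    · rw [pvDescend, if_pos h]
      have hkf : fail.getD (k - 1) 0 = pvM pat (pat.take k) (k - 1) := by
        have := hfail (k - 1) (by omega)
        rwa [Nat.sub_add_cancel (by omega)] at this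
      set k' := fail.getD (k - 1) 0 with hk'
      have hk'le : k' ≤ k - 1 := by rw [hkf]; exact pvM_le _ _ _
      have hk'suf : pat.take k' <:+ pat.take k := by rw [hkf]; exact pvM_spec _ _ _
      have hP' : pat.take k' <:+ s := hk'suf.trans hP
      have hrec := ih k' (by omega) (by omega) hP' (fun j hj => hfail j (by omega))
      refine ⟨by omega, hrec.2.1, hrec.2.2.1, ?_⟩
      intro j h1 h2 h3 h4 h5
      rcases Nat.lt_or_ge j (k + 1) with hj | hj
      · -- j ≤ k: j-1 is a proper border of pat.take k, hence ≤ k'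
        have hb : pat.take (j - 1) <:+ pat.take k := pvBorder pat s (j - 1) k (by omega) h4 hP
        have : j - 1 ≤ pvM pat (pat.take k) (k - 1) := pvM_ge _ _ _ _ (by omega) hb
        exact hrec.2.2.2 j h1 (by omega) h3 h4 h5
      · -- j = k + 1: contradicts the loop condition t ≠ pat[k]
        have hjk : j = k + 1 := by omega
        exfalso
        apply h.2
        rw [← h5, hjk]
        simp
    · rw [pvDescend, if_neg h]
      push_neg at h
      refine ⟨le_rfl, hP, ?_, ?_⟩
      · rcases Nat.eq_zero_or_pos k with h0 | h0
        · exact Or.inl h0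
        · exact Or.inr (h h0)
      · intro j _ h2 _ _ _
        omega

-- one KMP step from a maximal state is a maximal state of the extended string
lemma pvStep_spec (pat : List String) (fail : List Nat) (s : List String) (t : String)
    (b k : Nat)
    (hfail : ∀ j, j < k → fail.getD j 0 = pvM pat (pat.take (j + 1)) j)
    (hkm : k < pat.length) (hP : pat.take k <:+ s)
    (hmax : ∀ j, j ≤ b → pat.take j <:+ s → j ≤ k) :
    (pat.take (if t = pat.getD (pvDescend pat fail t k k) "" then pvDescend pat fail t k k + 1 else pvDescend pat fail t k k) <:+ s ++ [t]) ∧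
    (∀ j, j ≤ b + 1 → j ≤ pat.length → pat.take j <:+ s ++ [t] →
      j ≤ (if t = pat.getD (pvDescend pat fail t k k) "" then pvDescend pat fail t k k + 1 else pvDescend pat fail t k k)) ∧
    (if t = pat.getD (pvDescend pat fail t k k) "" then pvDescend pat fail t k k + 1 else pvDescend pat fail t k k) ≤ k + 1 := by
  obtain ⟨hd1, hd2, hd3, hd4⟩ := pvDescend_spec pat fail s t k k le_rfl hkm hP hfail
  set k1 := pvDescend pat fail t k k with hk1
  by_cases heq : t = pat.getD k1 ""
  · rw [if_pos heq]
    refine ⟨?_, ?_, by omega⟩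
    · rw [pvExtend pat s t (k1 + 1) (by omega) (by omega)]
      simpa using ⟨hd2, heq.symm⟩
    · intro j hj hjm hsuf
      rcases Nat.eq_zero_or_pos j with h0 | h0
      · omega
      · rw [pvExtend pat s t j h0 hjm] at hsuf
        have hjk : j - 1 ≤ k := hmax (j - 1) (by omega) hsuf.1
        exact hd4 j h0 (by omega) hjm hsuf.1 hsuf.2
  · rw [if_neg heq]
    have hk10 : k1 = 0 := by
      rcases hd3 with h | h
      · exact h
      · exact absurd h heq
    refine ⟨by rw [hk10]; simp, ?_, by omega⟩
    intro j hj hjm hsuf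
    rcases Nat.eq_zero_or_pos j with h0 | h0
    · omega
    · rw [pvExtend pat s t j h0 hjm] at hsuf
      have hjk : j - 1 ≤ k := hmax (j - 1) (by omega) hsuf.1
      have hj1 : j ≤ k1 + 1 := hd4 j h0 (by omega) hjm hsuf.1 hsuf.2
      rcases Nat.eq_or_lt_of_le hj1 with he | hl
      · exfalso
        apply heq
        rw [← hsuf.2]
        congr 1
        omega
      · omega

-- the failure-table loop fills slot j with the longest proper border of pat.take (j+1)
lemma pvFailAux_spec (pat : List String) :
    ∀ cnt fail k i, fail.length = i → 1 ≤ i → i + cnt ≤ pat.length →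
    (∀ j, j < i → fail.getD j 0 = pvM pat (pat.take (j + 1)) j) →
    k = pvM pat (pat.take i) (i - 1) →
    ∀ j, j < i + cnt →
      (pvFailAux pat fail k (List.range' i cnt)).getD j 0 = pvM pat (pat.take (j + 1)) j := by
  intro cnt
  induction cnt with
  | zero =>
    intro fail k i hlen h1 hle hprev hk j hj
    simpa [pvFailAux] using hprev j (by omega)
  | succ cnt ih =>
    intro fail k i hlen h1 hle hprev hk j hj
    rw [List.range'_succ, pvFailAux]
    have hkle : k ≤ i - 1 := by rw [hk]; exact pvM_le _ _ _
    have hstep := pvStep_spec pat fail (pat.take i) (pat.getD i "") (i - 1) k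
      (fun j hj => hprev j (by omega)) (by omega)
      (by rw [hk]; exact pvM_spec _ _ _)
      (fun j hj hs => by rw [hk]; exact pvM_ge _ _ _ _ hj hs)
    rw [← pvTakeSnoc pat i (by omega)] at hstep
    set k1 := pvDescend pat fail (pat.getD i "") k k with hk1
    set k2 := if pat.getD i "" = pat.getD k1 "" then k1 + 1 else k1 with hk2d
    have hstep' := hstep
    have hk2 : k2 = pvM pat (pat.take (i + 1)) i := by
      have hub : k2 ≤ i := by
        have := pvM_le pat (pat.take i) (i - 1)
        omega
      apply le_antisymm
      · exact pvM_ge _ _ _ _ hub hstep'.1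
      · exact hstep'.2.1 _ (by have := pvM_le pat (pat.take (i+1)) i; omega)
          (by have := pvM_le pat (pat.take (i+1)) i; omega) (pvM_spec _ _ _)
    apply ih (fail ++ [k2]) k2 (i + 1) (by simp [hlen]) (by omega) (by omega)
    · intro j' hj'
      rcases Nat.lt_or_ge j' i with hji | hji
      · rw [List.getD_append _ _ _ _ (by omega)]
        exact hprev j' hji
      · have hji' : j' = i := by omega
        subst hji'
        rw [List.getD_eq_getElem?_getD, List.getElem?_append_right (by omega), hlen]
        simpa using hk2
    · simpa using hk2
    · omega

lemma pvFail_spec (pat : List String) (hm : 1 ≤ pat.length) :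
    ∀ j, j < pat.length → (pvFail pat).getD j 0 = pvM pat (pat.take (j + 1)) j := by
  intro j hj
  have h0 : ∀ j', j' < 1 → ([0] : List Nat).getD j' 0 = pvM pat (pat.take (j' + 1)) j' := by
    intro j' hj'
    have : j' = 0 := by omega
    subst this
    simp [pvM, Nat.findGreatest]
  exact pvFailAux_spec pat (pat.length - 1) [0] 0 1 rfl le_rfl (by omega) h0
    (by simp [pvM, Nat.findGreatest]) j (by omega)

lemma pvRange'_split (i j n : Nat) (h1 : i ≤ j) (h2 : j ≤ i + n) :
    List.range' i n = List.range' i (j - i) ++ List.range' j (n - (j - i)) := by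
  have := List.range'_append (s := i) (m := j - i) (n := n - (j - i)) (step := 1)
  have e1 : i + 1 * (j - i) = j := by omega
  have e2 : (j - i) + (n - (j - i)) = n := by omega
  rw [e1, e2] at this
  exact this.symm

lemma pvFind?_range_eq_none (N : Nat) (p : Nat → Bool) (h : ∀ j, j < N → ¬ p j) :
    (List.range N).find? p = none := by
  rw [List.find?_eq_none]
  intro x hx
  exact h x (List.mem_range.mp hx)

lemma pvFind?_range_eq_some (N j0 : Nat) (p : Nat → Bool) (h0 : p j0) (hlt : j0 < N)
    (hmin : ∀ j, j < j0 → ¬ p j) : (List.range N).find? p = some j0 := by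
  rw [List.range_eq_range', pvRange'_split 0 j0 N (by omega) (by omega), List.find?_append]
  have hpre : (List.range' 0 (j0 - 0)).find? p = none := by
    rw [List.find?_eq_none]
    intro x hx
    have := List.mem_range'_1.mp hx
    exact hmin x (by omega)
  rw [hpre]
  have : N - (j0 - 0) = (N - j0 - 1) + 1 := by omega
  rw [this, List.range'_succ]
  simp [h0]

-- a window match at j is a suffix-prefix ending at j + m
lemma pvMatchIff (fs pat : List String) (j : Nat) (hj : j + pat.length ≤ fs.length) :
    (List.take pat.length (List.drop j fs) = pat) ↔ pat <:+ fs.take (j + pat.length) := by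
  have hsplit : fs.take (j + pat.length) = fs.take j ++ (fs.drop j).take pat.length :=
    List.take_add ..
  constructor
  · intro h
    rw [hsplit, h]
    exact List.suffix_append _ _
  · intro h
    rw [hsplit] at h
    have hw : (fs.drop j).take pat.length <:+ fs.take j ++ (fs.drop j).take pat.length :=
      List.suffix_append _ _
    have hlenw : ((fs.drop j).take pat.length).length = pat.length := by
      simp
      omega
    have hps := List.suffix_of_suffix_length_le h hw (by rw [hlenw])
    exact (List.IsSuffix.eq_of_length hps (by rw [hlenw])).symm

-- the KMP scan from a maximal, match-free state returns the first-match splice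
lemma pvKmpScan_spec (td : List (List String)) (pat : List String)
    (hm : 0 < pat.length) (hmn : pat.length ≤ td.length) :
    ∀ rest i k, td.drop i = rest → i ≤ td.length →
    k = pvM pat ((td.map (fun d => d.headD "")).take i) pat.length → k < pat.length →
    (∀ e, e ≤ i → ¬ (pat <:+ (td.map (fun d => d.headD "")).take e)) →
    pvKmpScan td pat (pvFail pat) rest i k =
      pvRes td pat.length ((List.range (td.length - pat.length + 1)).find? (fun j =>
        decide (List.take pat.length (List.drop j (td.map (fun d => d.headD ""))) = pat))) := by
  intro rest
  induction rest with
  | nil =>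
    intro i k hdrop hin hk hkm hnom
    have hin' : td.length ≤ i := by
      by_contra hlt
      push_neg at hlt
      have : td.drop i ≠ [] := by
        intro h
        have := List.length_drop (l := td) (i := i)
        rw [h] at this
        simp at this
        omega
      exact this hdrop
    have hi : i = td.length := by omega
    have hnone : (List.range (td.length - pat.length + 1)).find? (fun j =>
        decide (List.take pat.length (List.drop j (td.map (fun d => d.headD ""))) = pat)) = none := by
      apply pvFind?_range_eq_none
      intro j hj
      simp only [decide_eq_true_eq]
      intro hmatch
      have hjl : j + pat.length ≤ td.length := by omega
      have := (pvMatchIff (td.map (fun d => d.headD "")) pat j (by simpa using hjl)).mp hmatch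
      exact hnom (j + pat.length) (by omega) this
    rw [hnone]
    rfl
  | cons data rest' ih =>
    intro i k hdrop hin hk hkm hnom
    have hin' : i < td.length := by
      by_contra hge
      push_neg at hge
      rw [List.drop_eq_nil_of_le hge] at hdrop
      simp at hdrop
    have hrest' : td.drop (i + 1) = rest' := by
      have : (td.drop i).drop 1 = td.drop (i + 1) := by
        rw [List.drop_drop]
      rw [← this, hdrop]
      rfl
    have hdata : td[i]? = some data := by
      have h0 : (td.drop i)[0]? = td[i + 0]? := List.getElem?_drop ..
      rw [hdrop] at h0
      simpa using h0.symm
    set fs := td.map (fun d => d.headD "") with hfs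
    have hfsi : fs[i]? = some (data.headD "") := by
      rw [hfs, List.getElem?_map, hdata]
      rfl
    have htake : fs.take (i + 1) = fs.take i ++ [data.headD ""] := by
      rw [List.take_add_one, hfsi]
      rfl
    have hstep := pvStep_spec pat (pvFail pat) (fs.take i) (data.headD "") pat.length k
      (fun j hj => pvFail_spec pat (by omega) j (by omega)) hkm
      (by rw [hk]; exact pvM_spec _ _ _)
      (fun j hj hs => by rw [hk]; exact pvM_ge _ _ _ _ hj hs)
    rw [← htake] at hstep
    rw [pvKmpScan]
    set k1 := pvDescend pat (pvFail pat) (data.headD "") k k with hk1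
    set k2 := if data.headD "" = pat.getD k1 "" then k1 + 1 else k1 with hk2d
    have hstep' := hstep
    have hk2M : k2 = pvM pat (fs.take (i + 1)) pat.length := by
      apply le_antisymm
      · exact pvM_ge _ _ _ _ (by omega) hstep'.1
      · exact hstep'.2.1 _ (by have := pvM_le pat (fs.take (i+1)) pat.length; omega)
          (pvM_le _ _ _) (pvM_spec _ _ _)
    by_cases hfin : k2 = pat.length
    · rw [if_pos hfin]
      have hsufm : pat <:+ fs.take (i + 1) := by
        have := hstep'.1
        rwa [hfin, List.take_length] at this
      have hmle : pat.length ≤ i + 1 := by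
        have := hsufm.length_le
        simp at this
        omega
      set j0 := i + 1 - pat.length with hj0
      have hsome : (List.range (td.length - pat.length + 1)).find? (fun j =>
          decide (List.take pat.length (List.drop j fs) = pat)) = some j0 := by
        apply pvFind?_range_eq_some
        · simp only [decide_eq_true_eq]
          rw [pvMatchIff fs pat j0 (by simp [hfs]; omega)]
          have : j0 + pat.length = i + 1 := by omega
          rw [this]
          exact hsufm
        · omega
        · intro j hj
          simp only [decide_eq_true_eq]
          intro hmatch
          have hjl : j + pat.length ≤ td.length := by omega
          have := (pvMatchIff fs pat j (by simp [hfs]; omega)).mp hmatch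
          exact hnom (j + pat.length) (by omega) this
      rw [hsome]
      show td.take (i + 1 - pat.length) ++ td.drop (i + 1) = td.take j0 ++ td.drop (j0 + pat.length)
      have : j0 + pat.length = i + 1 := by omega
      rw [this]
    · rw [if_neg hfin]
      have hk2m : k2 < pat.length := by
        have := pvM_le pat (fs.take (i + 1)) pat.length
        omega
      apply ih (i + 1) k2 hrest' (by omega) (by rw [hk2M]) hk2m
      intro e he
      rcases Nat.lt_or_ge e (i + 1) with he' | he'
      · exact hnom e (by omega)
      · have he'' : e = i + 1 := by omega
        subst he''
        intro hsuf
        have : pat.length ≤ k2 := hstep'.2.1 pat.length (by omega) le_rfl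
          (by rwa [List.take_length])
        omega

-- ===== A-side: the scan over an index list is the first match in that list =====
lemma pvAScan_eq (td : List (List String)) (pat : List String) :
    ∀ l : List Nat, pvAScan td pat (l.map Int.ofNat) =
      pvRes td pat.length (l.find? (fun j =>
        decide (List.take pat.length (List.drop j (td.map (fun d => d.headD ""))) = pat))) := by
  intro l
  induction l with
  | nil => simp [pvAScan, pvRes]
  | cons j l ih =>
    have hcond : ((PySem.List.slice td (some (Int.ofNat j)) (some ((Int.ofNat j) + (pat.length : Int)))).map (fun d => d.headD "") = pat)
        ↔ (List.take pat.length (List.drop j (td.map (fun d => d.headD ""))) = pat) := by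
      have : (Int.ofNat j) = ((j : Nat) : Int) := rfl
      rw [this, PySem.List.slice_natCast_add, List.map_take, List.map_drop]
    by_cases hc : List.take pat.length (List.drop j (td.map (fun d => d.headD ""))) = pat
    · simp only [List.map_cons, pvAScan, hcond.mpr hc, if_true, List.find?_cons, hc, decide_true]
      have e1 : PySem.List.slice td none (some (Int.ofNat j)) = td.take j := by
        exact_mod_cast PySem.List.slice_to_natCast td j
      have e2 : PySem.List.slice td (some ((Int.ofNat j) + (pat.length : Int))) none = td.drop (j + pat.length) := by
        have : (Int.ofNat j) + (pat.length : Int) = ((j + pat.length : Nat) : Int) := by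
          simp only [Int.ofNat_eq_natCast]; push_cast; ring
        rw [this, PySem.List.slice_from_natCast]
      rw [e1, e2]; rfl
    · simp only [List.map_cons, pvAScan, List.find?_cons, hc, decide_false]
      rw [if_neg (fun h => hc (hcond.mp h))]
      exact ih

-- ===== VERDICT (by name: the statement is the Claim_ definition above) =====
theorem without_consecutive_tokens_spec : Claim_equal_without_consecutive_tokens := by
  intro td pat _hdom _hpre
  unfold Spec_without_consecutive_tokens
  simp only [without_consecutive_tokens, without_consecutive_tokens_alt]
  by_cases hmn : pat.length > td.length
  · rw [if_pos (by exact_mod_cast hmn), if_pos (by simp [hmn])]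
  · rw [if_neg (by exact_mod_cast hmn)]
    have hle : pat.length ≤ td.length := by omega
    have hrange : PySem.List.pyRange 0 ((td.length : Int) - (pat.length : Int) + 1) 1 =
        (List.range (td.length - pat.length + 1)).map Int.ofNat := by
      rw [PySem.List.pyRange_one]
      have : ((td.length : Int) - (pat.length : Int) + 1 - 0).toNat = td.length - pat.length + 1 := by omega
      rw [this]
      simp
    rw [hrange, pvAScan_eq]
    by_cases hm0 : pat.length = 0
    · have hpat : pat = [] := List.eq_nil_of_length_eq_zero hm0
      rw [if_pos (Or.inl (by simp [hm0]))]
      subst hpat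
      rw [List.range_succ_eq_map, List.find?_cons]
      simp [pvRes]
    · rw [if_neg (by simp [hm0, hmn])]
      have hM0 : (0 : Nat) = pvM pat ((td.map (fun d => d.headD "")).take 0) pat.length := by
        symm
        simp only [List.take_zero, pvM]
        rw [Nat.findGreatest_eq_zero_iff]
        intro j hj hjle h
        rw [List.suffix_nil] at h
        have hlen : min j pat.length = 0 := by simpa using congrArg List.length h
        omega
      have hnom : ∀ e, e ≤ 0 → ¬ (pat <:+ ((td.map (fun d => d.headD "")).take e)) := by
        intro e he
        have he0 : e = 0 := by omega
        subst he0
        simp only [List.take_zero, List.suffix_nil]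
        intro h
        exact hm0 (by simp [h])
      have hscan := pvKmpScan_spec td pat (by omega) hle td 0 0 rfl (by omega) hM0 (by omega) hnom
      rw [hscan]
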